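-- pv_equiv track=rewrite | github.com/Tonychen0227/MoistBot-Public | StaticUtilities.py | convert_to_string
-- ===== SOURCE A (Python) =====
-- def convert_to_string(arr):
--     size = len(arr)
--     i = 0
--     strings = list()
--     accumulator = ""
--     while i < size:
--         if arr[i] == 0x0A:
--             strings.append(accumulator)
--             accumulator = ""
--         if arr[i] != 0x0D or arr[i] != 0x0A:
--             accumulator = accumulator + str(chr(arr[i]))
--         i += 1
--
--     return accumulator
-- ===== SOURCE B (Python) =====
-- def convert_to_string(arr):
--     start = 0
--     for idx, x in enumerate(arr):
--         if x == 0x0A: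
--             start = idx
--     return ''.join(chr(x) for x in arr[start:])
-- ===== Notes on version B (the rewrite author's own statement) =====
-- stated objective: faster
-- what changed: Replaces the accumulate-and-reset-on-newline loop (quadratic repeated string concatenation, unused strings list, always-true != filter) by a locate-the-last-newline scan followed by one join over just that suffix.
-- outside the precondition, e.g. on convert_to_string([1114112]): A raises ValueError, B raises ValueError
import Mathlib
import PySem

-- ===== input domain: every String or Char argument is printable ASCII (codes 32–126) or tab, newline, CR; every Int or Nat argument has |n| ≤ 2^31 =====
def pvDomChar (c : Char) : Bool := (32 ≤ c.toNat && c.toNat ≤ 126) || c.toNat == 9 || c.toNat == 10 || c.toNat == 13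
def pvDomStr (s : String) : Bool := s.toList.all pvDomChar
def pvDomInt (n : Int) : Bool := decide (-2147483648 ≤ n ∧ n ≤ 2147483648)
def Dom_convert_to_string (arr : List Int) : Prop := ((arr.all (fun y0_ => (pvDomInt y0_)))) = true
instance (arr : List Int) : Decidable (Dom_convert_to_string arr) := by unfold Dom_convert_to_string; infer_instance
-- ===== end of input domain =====

-- B replaces A's accumulate-and-reset-on-newline loop by locating the last newline and building the suffix string; objective: simpler.


-- ===== PORT A =====
def convert_to_string (arr : List Int) : String :=
  let size := PySem.List.len arr
  ((PySem.List.pyRange 0 size 1).foldl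
    (fun (st : List String × String) i =>
      let x := PySem.List.pyGetD arr i 0
      -- if arr[i] == 0x0A: strings.append(accumulator); accumulator = ""
      let st1 := if x == 10 then (st.1 ++ [st.2], "") else st
      -- if arr[i] != 0x0D or arr[i] != 0x0A: accumulator += str(chr(arr[i]))
      -- chr ported by hand as Char.ofNat; exact on Pre_ (0 ≤ x < 0x110000, no surrogates)
      if x != 13 || x != 10 then (st1.1, st1.2 ++ String.ofList [Char.ofNat x.toNat]) else st1)
    ([], "")).2

-- ===== PORT B =====
def convert_to_string_alt (arr : List Int) : String :=
  let start := (PySem.List.enumerate arr).foldl (fun s p => if p.2 == 10 then p.1 else s) 0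
  -- ''.join(chr(x) for x in arr[start:]); chr ported by hand as Char.ofNat (exact on Pre_)
  String.ofList ((PySem.List.slice arr (some start)).map (fun x => Char.ofNat x.toNat))

-- ===== PRECONDITION & SPEC =====
-- Pre_ excludes elements outside chr's range [0, 0x110000) (there Python raises ValueError), and
-- additionally the surrogate code points 0xD800–0xDFFF: A returns a lone-surrogate string there,
-- which Lean's Char/String cannot represent, so such inputs are excluded as unportable.
def Pre_convert_to_string (arr : List Int) : Prop :=
  ∀ x ∈ arr, 0 ≤ x ∧ x < 1114112 ∧ ¬(55296 ≤ x ∧ x < 57344)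
instance (arr : List Int) : Decidable (Pre_convert_to_string arr) := by
  unfold Pre_convert_to_string; infer_instance
def pvWitness_convert_to_string : List Int := [72, 105, 10, 33]
def Spec_convert_to_string (arr : List Int) (out : String) : Prop := out = convert_to_string_alt arr
instance (arr : List Int) (out : String) : Decidable (Spec_convert_to_string arr out) := by unfold Spec_convert_to_string; infer_instance

-- ===== CLAIM (what is proved, stated in full; the proofs are below) =====
def Claim_equal_convert_to_string : Prop := ∀ (arr : List Int), Dom_convert_to_string arr → Pre_convert_to_string arr → Spec_convert_to_string arr (convert_to_string arr)

-- ===== LEMMAS AND PROOFS =====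

-- A's loop body as a plain fold step
def pvStepA (st : List String × String) (x : Int) : List String × String :=
  let st1 := if x == 10 then (st.1 ++ [st.2], "") else st
  if x != 13 || x != 10 then (st1.1, st1.2 ++ String.ofList [Char.ofNat x.toNat]) else st1

-- the suffix of xs starting at the last occurrence of 10 (whole list if none)
def pvSuf : List Int → List Int
  | [] => []
  | x :: xs => if 10 ∈ xs then pvSuf xs else x :: xs

-- index of the last occurrence of 10 (meaningful when 10 ∈ xs)
def pvLastIdx : List Int → Nat
  | [] => 0
  | _ :: xs => if 10 ∈ xs then 1 + pvLastIdx xs else 0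

lemma pvStepA_snd (st : List String × String) (x : Int) :
    (pvStepA st x).2 = (if x = 10 then "" else st.2) ++ String.ofList [Char.ofNat x.toNat] := by
  by_cases h : x = 10 <;> simp [pvStepA, h]

lemma pvMk_append (l m : List Char) : String.ofList l ++ String.ofList m = String.ofList (l ++ m) :=
  (@String.ofList_append l m).symm

lemma pvFoldA (xs : List Int) (st : List String × String) :
    (xs.foldl pvStepA st).2 =
      if 10 ∈ xs then String.ofList ((pvSuf xs).map (fun x => Char.ofNat x.toNat))
      else st.2 ++ String.ofList (xs.map (fun x => Char.ofNat x.toNat)) := by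
  induction xs generalizing st with
  | nil => simp [String.append_empty]
  | cons x xs ih =>
    simp only [List.foldl_cons, ih (pvStepA st x), pvStepA_snd, List.mem_cons, pvSuf]
    by_cases hxs : 10 ∈ xs
    · simp [hxs]
    · by_cases hx : x = 10
      · subst hx
        simp only [hxs, if_false, String.empty_append, List.map_cons, true_or, if_pos]
        simp
        rw [show ("\n" : String) = String.ofList [Char.ofNat (10:Int).toNat] from rfl, pvMk_append]
        rfl
      · simp [hxs, hx, Ne.symm hx, pvMk_append, String.append_assoc]

lemma pvSuf_of_not_mem (xs : List Int) (h : 10 ∉ xs) : pvSuf xs = xs := by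
  induction xs with
  | nil => rfl
  | cons x xs ih =>
    simp only [List.mem_cons] at h
    have hxs : 10 ∉ xs := fun m => h (Or.inr m)
    simp [pvSuf, hxs]

lemma pvA_eq (arr : List Int) :
    convert_to_string arr = String.ofList ((pvSuf arr).map (fun x => Char.ofNat x.toNat)) := by
  have h1 : convert_to_string arr = (arr.foldl pvStepA ([], "")).2 := by
    show ((PySem.List.pyRange 0 (PySem.List.len arr) 1).foldl
      (fun st i => pvStepA st (PySem.List.pyGetD arr i 0)) ([], "")).2 = _
    rw [PySem.List.foldl_pyRange_zero_pyGetD]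
  rw [h1, pvFoldA]
  by_cases h : 10 ∈ arr
  · simp [h]
  · simp [h, pvSuf_of_not_mem arr h, String.empty_append]

lemma pvEnumFold (xs : List Int) (s : Int) (v : Int) :
    (PySem.List.enumerate xs s).foldl (fun a p => if p.2 == 10 then p.1 else a) v =
      if 10 ∈ xs then s + (pvLastIdx xs : Int) else v := by
  induction xs generalizing s v with
  | nil => simp [PySem.List.enumerate]
  | cons x xs ih =>
    rw [PySem.List.enumerate_cons]
    simp only [List.foldl_cons, ih, List.mem_cons, pvLastIdx]
    by_cases hxs : 10 ∈ xs
    · simp [hxs]; ring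
    · by_cases hx : x = 10
      · simp [hxs, hx]
      · simp [hxs, hx, Ne.symm hx]

lemma pvDrop_lastIdx (xs : List Int) (h : 10 ∈ xs) :
    xs.drop (pvLastIdx xs) = pvSuf xs := by
  induction xs with
  | nil => cases h
  | cons x xs ih =>
    simp only [pvLastIdx, pvSuf]
    by_cases hxs : 10 ∈ xs
    · simp [hxs, Nat.add_comm, ih hxs]
    · simp [hxs]

lemma pvB_eq (arr : List Int) :
    convert_to_string_alt arr = String.ofList ((pvSuf arr).map (fun x => Char.ofNat x.toNat)) := by
  show String.ofList ((PySem.List.slice arr (some ((PySem.List.enumerate arr).foldl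
      (fun s p => if p.2 == 10 then p.1 else s) 0))).map _) = _
  rw [pvEnumFold arr 0 0]
  by_cases h : 10 ∈ arr
  · have : (0 : Int) + (pvLastIdx arr : Int) = ((pvLastIdx arr : Nat) : Int) := by ring
    simp only [h, if_pos, this, PySem.List.slice_from_natCast, pvDrop_lastIdx arr h]
  · have z : ((0 : Nat) : Int) = (0 : Int) := rfl
    simp only [h, ← z, PySem.List.slice_from_natCast, List.drop_zero,
      pvSuf_of_not_mem arr h, if_false]

-- ===== VERDICT (by name: the statement is the Claim_ definition above) =====
theorem convert_to_string_spec : Claim_equal_convert_to_string := by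
  intro arr _ _
  show convert_to_string arr = convert_to_string_alt arr
  rw [pvA_eq, pvB_eq]
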